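-- pv_equiv track=rewrite | github.com/Andruixxd31/binary_search_problems | python/easy/3-6-9.py | solve
-- ===== SOURCE A (Python) =====
-- def solve(n):
--     l = []
--     for i in range(n):
--         a = i + 1
--         if a % 3 == 0:
--             l.append("clap")
--             continue
--         while a > 0:
--             if a % 10 in [3,6,9]:
--                 l.append("clap")
--                 break
--             else:
--                 a = a // 10
--         if a == 0:
--             l.append(str(i+1))
--
--     return l
-- ===== SOURCE B (Python) =====
-- def solve(n):
--     # Dynamic programming: has[x] records whether x's decimal digits meet {3,6,9},
--     # computed in O(1) per x from has[x // 10] (memo table) instead of re-scanning digits.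
--     out = []
--     has = [False] * (n + 1)
--     for x in range(1, n + 1):
--         has[x] = x % 10 in (3, 6, 9) or has[x // 10]
--         out.append("clap" if x % 3 == 0 or has[x] else str(x))
--     return out
-- ===== Notes on version B (the rewrite author's own statement) =====
-- stated objective: alternative
-- what changed: Replaces A's per-number digit-extraction while-loop (a%10 / a//=10 with break and the a==0 sentinel) by a dynamic-programming memo table has[1..n] where has[x] is derived in O(1) from has[x//10], so no number's digits are ever re-scanned.
import Mathlib
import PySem

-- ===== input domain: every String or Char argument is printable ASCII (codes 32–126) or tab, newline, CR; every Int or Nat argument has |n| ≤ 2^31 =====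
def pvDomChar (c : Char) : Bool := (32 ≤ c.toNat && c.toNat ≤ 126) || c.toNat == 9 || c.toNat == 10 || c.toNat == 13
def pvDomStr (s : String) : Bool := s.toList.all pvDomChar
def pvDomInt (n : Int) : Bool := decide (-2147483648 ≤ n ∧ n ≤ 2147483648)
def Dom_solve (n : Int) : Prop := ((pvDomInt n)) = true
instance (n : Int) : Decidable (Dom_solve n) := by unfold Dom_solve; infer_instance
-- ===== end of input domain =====

-- B replaces A's per-number digit-extraction while-loop (break + a==0 sentinel) by a
-- dynamic-programming memo table has[x] derived from has[x // 10]; objective: alternative.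

-- ===== PORT A =====
-- the inner 'while a > 0' loop: returns (did it break on a clap digit, final a)
def solveWhile (a : Int) : Bool × Int :=
  if 0 < a then
    if PySem.Int.mod a 10 ∈ ([3, 6, 9] : List Int) then (true, a)
    else solveWhile (PySem.Int.floordiv a 10)
  else (false, a)
termination_by a.toNat
decreasing_by
  rename_i h _
  have : PySem.Int.floordiv a 10 = a / 10 := Int.fdiv_eq_ediv_of_nonneg a (by norm_num)
  omega

-- the body of A's for-loop, transliterated
def solveStep (l : List String) (i : Int) : List String :=
  let a := i + 1
  if PySem.Int.mod a 3 = 0 then l ++ ["clap"]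
  else
    let r := solveWhile a
    let l := if r.1 then l ++ ["clap"] else l
    if r.2 = 0 then l ++ [PySem.Int.toStr (i + 1)] else l

def solve (n : Int) : List String :=
  (PySem.List.pyRange 0 n 1).foldl solveStep []

-- ===== PORT B =====
-- the body of B's for-loop: state = (has memo table, output list)
def solveAltStep (st : Array Bool × List String) (x : Int) : Array Bool × List String :=
  let h := decide (PySem.Int.mod x 10 ∈ ([3, 6, 9] : List Int)) ||
      st.1.getD (PySem.Int.floordiv x 10).toNat false    -- has[x // 10]: index provably in range
  (st.1.set! x.toNat h,
   st.2 ++ [if PySem.Int.mod x 3 == 0 || h then "clap" else PySem.Int.toStr x])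

def solve_alt (n : Int) : List String :=
  ((PySem.List.pyRange 1 (n + 1) 1).foldl solveAltStep
      (Array.replicate (n + 1).toNat false, [])).2

-- ===== PRECONDITION & SPEC =====
def Spec_solve (n : Int) (out : List String) : Prop := out = solve_alt n
instance (n : Int) (out : List String) : Decidable (Spec_solve n out) := by unfold Spec_solve; infer_instance

-- ===== CLAIM (what is proved, stated in full; the proofs are below) =====
def Claim_equal_solve : Prop := ∀ (n : Int), Dom_solve n → Spec_solve n (solve n)

-- ===== LEMMAS AND PROOFS =====

-- does some decimal digit of n lie in {3,6,9}?
def anyDigits (n : Nat) : Bool :=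
  ("369".toList.contains (Nat.digitChar (n % 10))) ||
    (if h : n / 10 = 0 then false else anyDigits (n / 10))
decreasing_by omega

lemma digitChar_mem (k : Nat) (hk : k < 10) :
    "369".toList.contains (Nat.digitChar k) = decide (k = 3 ∨ k = 6 ∨ k = 9) := by
  interval_cases k <;> decide

lemma anyDigits_zero : anyDigits 0 = false := by rw [anyDigits]; decide

lemma anyDigits_unfold (n : Nat) :
    anyDigits n
      = (("369".toList.contains (Nat.digitChar (n % 10))) || anyDigits (n / 10)) := by
  rw [anyDigits]
  by_cases h : n / 10 = 0
  · rw [dif_pos h, h, anyDigits_zero]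
  · rw [dif_neg h]

lemma mod10_eq (a : Int) (ha : 0 < a) :
    PySem.Int.mod a 10 = ((a.toNat % 10 : Nat) : Int) := by
  show Int.fmod a 10 = _
  rw [Int.fmod_eq_emod]
  norm_num
  omega

lemma solveWhile_spec (a : Int) (ha : 0 < a) :
    (solveWhile a).1 = anyDigits a.toNat ∧
      ((solveWhile a).2 = 0 ↔ anyDigits a.toNat = false) := by
  induction a using solveWhile.induct with
  | case3 a h => omega
  | case1 a h hd =>
    have h10 : a.toNat % 10 = 3 ∨ a.toNat % 10 = 6 ∨ a.toNat % 10 = 9 := by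
      rw [mod10_eq a h] at hd; simp at hd; omega
    have hany : anyDigits a.toNat = true := by
      rw [anyDigits, digitChar_mem _ (by omega)]; simp [h10]
    rw [solveWhile, if_pos h, if_pos hd, hany]
    simp
    omega
  | case2 a h hd ih =>
    have hfd : PySem.Int.floordiv a 10 = a / 10 :=
      Int.fdiv_eq_ediv_of_nonneg a (by norm_num)
    have h10 : ¬(a.toNat % 10 = 3 ∨ a.toNat % 10 = 6 ∨ a.toNat % 10 = 9) := by
      rw [mod10_eq a h] at hd; simp at hd; omega
    have hstep : solveWhile a = solveWhile (PySem.Int.floordiv a 10) := by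
      rw [solveWhile, if_pos h, if_neg hd]
    have hdig : "369".toList.contains (Nat.digitChar (a.toNat % 10)) = false := by
      rw [digitChar_mem _ (by omega)]; simp [h10]
    by_cases hz : a / 10 = 0
    · have hz' : a.toNat / 10 = 0 := by omega
      have hany : anyDigits a.toNat = false := by
        rw [anyDigits, hdig, dif_pos hz']; rfl
      rw [hstep, hfd, hz, hany, solveWhile]
      norm_num
    · have hq : 0 < PySem.Int.floordiv a 10 := by rw [hfd]; omega
      have hqt : (PySem.Int.floordiv a 10).toNat = a.toNat / 10 := by rw [hfd]; omega
      have hany : anyDigits a.toNat = anyDigits (a.toNat / 10) := by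
        rw [anyDigits, hdig, dif_neg (by omega)]
        rfl
      rw [hstep, hany, ← hqt]
      exact ih hq

-- the label both loop bodies produce for the number x ≥ 1
def outFor (x : Nat) : String :=
  if anyDigits x || decide (x % 3 = 0) then "clap" else PySem.Int.toStr (x : Int)

lemma mod3_eq (i : Int) (hi : 0 ≤ i) :
    (PySem.Int.mod (i + 1) 3 = 0) ↔ ((i + 1).toNat % 3 = 0) := by
  show Int.fmod (i + 1) 3 = 0 ↔ _
  rw [Int.fmod_eq_emod]
  omega

lemma step_eq (i : Int) (hi : 0 ≤ i) (l : List String) :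
    solveStep l i = l ++ [outFor (i + 1).toNat] := by
  have ha : (0:Int) < i + 1 := by omega
  obtain ⟨h1, h2⟩ := solveWhile_spec (i + 1) ha
  show (if PySem.Int.mod (i + 1) 3 = 0 then l ++ ["clap"]
        else if (solveWhile (i + 1)).2 = 0
             then (if (solveWhile (i + 1)).1 then l ++ ["clap"] else l) ++ [PySem.Int.toStr (i + 1)]
             else (if (solveWhile (i + 1)).1 then l ++ ["clap"] else l)) = l ++ [outFor (i + 1).toNat]
  rw [outFor]
  have hcast : ((i + 1).toNat : Int) = i + 1 := by omega
  by_cases h3 : PySem.Int.mod (i + 1) 3 = 0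
  · have hb : (i + 1).toNat % 3 = 0 := (mod3_eq i hi).mp h3
    rw [if_pos h3, hb]
    simp
  · have hb : ¬((i + 1).toNat % 3 = 0) := fun hc => h3 ((mod3_eq i hi).mpr hc)
    rw [if_neg h3]
    by_cases hd : anyDigits (i + 1).toNat = true
    · have : (solveWhile (i + 1)).2 ≠ 0 := fun hc => by simp [h2.mp hc] at hd
      rw [if_neg this, h1, hd]
      simp
    · simp only [Bool.not_eq_true] at hd
      have : (solveWhile (i + 1)).2 = 0 := by rw [h2, hd]
      rw [if_pos this, h1, hd, hcast]
      simp [hb]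

lemma foldl_stepA (l : List Int) (h : ∀ i ∈ l, 0 ≤ i) (acc : List String) :
    l.foldl solveStep acc = acc ++ l.map (fun i => outFor (i + 1).toNat) := by
  induction l generalizing acc with
  | nil => simp
  | cons x xs ih =>
    rw [List.foldl_cons, step_eq x (h x (by simp)), ih (fun i hi => h i (by simp [hi]))]
    simp

-- B's fold invariant: after processing 1..m, the output is the labels and has[j] = anyDigits j for j ≤ m
lemma alt_fold (n : Nat) (m : Nat) (hm : m ≤ n) :
    ∃ A : Array Bool,
      ((List.range m).map (fun k : Nat => (1 : Int) + (k : Int))).foldl solveAltStep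
          (Array.replicate (n + 1) false, ([] : List String))
        = (A, (List.range m).map (fun k => outFor (k + 1))) ∧
      A.size = n + 1 ∧
      (∀ j : Nat, A.getD j false = (decide (j ≤ m) && anyDigits j)) := by
  induction m with
  | zero =>
    refine ⟨Array.replicate (n + 1) false, by simp, by simp, fun j => ?_⟩
    rw [Array.getD_eq_getD_getElem?, Array.getElem?_replicate]
    have hz : (decide (j ≤ 0) && anyDigits j) = false := by
      rcases Nat.eq_zero_or_pos j with hj | hj
      · subst hj; rw [anyDigits_zero, Bool.and_false]
      · have : ¬(j ≤ 0) := by omega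
        simp [this]
    rw [hz]; split <;> rfl
  | succ m ih =>
    obtain ⟨A, hfold, hsize, hget⟩ := ih (by omega)
    have hx : ((1 : Int) + (m : Nat)) = (((m + 1 : Nat) : Int)) := by push_cast; ring
    have hr : (m + 1) % 10 < 10 := by omega
    -- the digit test at x = m + 1
    have hmod10 : PySem.Int.mod ((m + 1 : Nat) : Int) 10 = (((m + 1) % 10 : Nat) : Int) := by
      exact_mod_cast PySem.Int.mod_natCast (m + 1) 10
    have hmem : decide (PySem.Int.mod ((m + 1 : Nat) : Int) 10 ∈ ([3, 6, 9] : List Int))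
        = "369".toList.contains (Nat.digitChar ((m + 1) % 10)) := by
      rw [hmod10, digitChar_mem _ hr]
      generalize (m + 1) % 10 = r at hr ⊢
      interval_cases r <;> decide
    have hdiv : (PySem.Int.floordiv ((m + 1 : Nat) : Int) 10).toNat = (m + 1) / 10 := by
      have : PySem.Int.floordiv ((m + 1 : Nat) : Int) 10 = (((m + 1) / 10 : Nat) : Int) := by
        exact_mod_cast PySem.Int.floordiv_natCast (m + 1) 10
      rw [this]; omega
    have hprev : A.getD ((m + 1) / 10) false = anyDigits ((m + 1) / 10) := by
      rw [hget]
      have : (m + 1) / 10 ≤ m := by omega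
      simp [this]
    -- the h computed by the step is exactly anyDigits (m+1)
    have hh : (decide (PySem.Int.mod ((m + 1 : Nat) : Int) 10 ∈ ([3, 6, 9] : List Int)) ||
        A.getD (PySem.Int.floordiv ((m + 1 : Nat) : Int) 10).toNat false) = anyDigits (m + 1) := by
      rw [hmem, hdiv, hprev]
      conv_rhs => rw [anyDigits_unfold]
    have hmod3 : (PySem.Int.mod ((m + 1 : Nat) : Int) 3 == 0) = decide ((m + 1) % 3 = 0) := by
      have : PySem.Int.mod ((m + 1 : Nat) : Int) 3 = (((m + 1) % 3 : Nat) : Int) := by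
        exact_mod_cast PySem.Int.mod_natCast (m + 1) 3
      rw [this]
      by_cases h : (m + 1) % 3 = 0 <;> (simp [h]; try omega)
    refine ⟨A.set! (m + 1) (anyDigits (m + 1)), ?_, by rw [Array.size_set!, hsize], ?_⟩
    · rw [List.range_succ, List.map_append, List.foldl_append, hfold]
      show solveAltStep _ ((1 : Int) + (m : Nat)) = _
      rw [hx, solveAltStep]
      simp only [hh, hmod3]
      simp only [Prod.mk.injEq]
      constructor
      · rw [Int.toNat_natCast]
      · rw [List.map_append, List.map_cons, List.map_nil, outFor]
        congr 1
        rw [Bool.or_comm]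
    · intro j
      by_cases hj : j = m + 1
      · subst hj
        rw [Array.getD_eq_getD_getElem?, Array.set!_eq_setIfInBounds]
        have hlt : m + 1 < A.size := by omega
        simp [hlt]
      · rw [Array.getD_eq_getD_getElem?, Array.set!_eq_setIfInBounds]
        have : (A.setIfInBounds (m + 1) (anyDigits (m + 1)))[j]? = A[j]? := by
          simp [Ne.symm hj]
        rw [this, ← Array.getD_eq_getD_getElem?, hget]
        have : (j ≤ m) ↔ (j ≤ m + 1) := by omega
        simp [this]

-- ===== VERDICT (by name: the statement is the Claim_ definition above) =====
theorem solve_spec : Claim_equal_solve := by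
  intro n _
  show solve n = solve_alt n
  rcases le_or_gt n 0 with hn | hn
  · have h1 : PySem.List.pyRange 0 n 1 = [] := by
      rw [PySem.List.pyRange_one]
      have : (n - 0).toNat = 0 := by omega
      rw [this]; rfl
    have h2 : PySem.List.pyRange 1 (n + 1) 1 = [] := by
      rw [PySem.List.pyRange_one]
      have : (n + 1 - 1).toNat = 0 := by omega
      rw [this]; rfl
    rw [solve, solve_alt, h1, h2]
    rfl
  · -- A's side: the list of labels
    rw [solve, foldl_stepA _ (fun i hi => by rw [PySem.List.mem_pyRange_one] at hi; omega),
      List.nil_append, PySem.List.pyRange_one, List.map_map]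
    -- B's side: unfold via the fold invariant at m = n.toNat
    have hsz : (n + 1).toNat = n.toNat + 1 := by omega
    have hlist : PySem.List.pyRange 1 (n + 1) 1
        = (List.range n.toNat).map (fun k : Nat => (1 : Int) + (k : Int)) := by
      rw [PySem.List.pyRange_one]
      have : (n + 1 - 1).toNat = n.toNat := by omega
      rw [this]
    obtain ⟨A, hfold, -, -⟩ := alt_fold n.toNat n.toNat (le_refl _)
    rw [solve_alt, hsz, hlist, hfold]
    have : (n - 0).toNat = n.toNat := by omega
    rw [this]
    refine List.map_congr_left fun k _ => ?_
    show outFor ((0 : Int) + k + 1).toNat = outFor (k + 1)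
    congr 1
    omega
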